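-- pv_equiv track=rewrite | github.com/hhchin1995/P-graph-algorithms | MSG.py | phiplus
-- ===== SOURCE A (Python) =====
-- def phiplus(M,O):
--     results=[]
--     for i in M:
--         for j in O:
--             for k in j[0]:
--                 if k==i:
--                     results.append(j)
--     return results
-- ===== SOURCE B (Python) =====
-- def phiplus(M, O):
--     if not M:
--         return []
--     index = {}
--     for j in O:
--         for k in j[0]:
--             index.setdefault(k, []).append(j)
--     results = []
--     for i in M:
--         results.extend(index.get(i, []))
--     return results
-- ===== Notes on version B (the rewrite author's own statement) =====
-- stated objective: alternative
-- what changed: B builds a dictionary from value to the list of O-entries whose first field contains it (with multiplicity, in O-order) in one pass over O (skipped entirely when M is empty), then concatenates one dictionary lookup per element of M instead of A's rescan of O for every i.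
import Mathlib
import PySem

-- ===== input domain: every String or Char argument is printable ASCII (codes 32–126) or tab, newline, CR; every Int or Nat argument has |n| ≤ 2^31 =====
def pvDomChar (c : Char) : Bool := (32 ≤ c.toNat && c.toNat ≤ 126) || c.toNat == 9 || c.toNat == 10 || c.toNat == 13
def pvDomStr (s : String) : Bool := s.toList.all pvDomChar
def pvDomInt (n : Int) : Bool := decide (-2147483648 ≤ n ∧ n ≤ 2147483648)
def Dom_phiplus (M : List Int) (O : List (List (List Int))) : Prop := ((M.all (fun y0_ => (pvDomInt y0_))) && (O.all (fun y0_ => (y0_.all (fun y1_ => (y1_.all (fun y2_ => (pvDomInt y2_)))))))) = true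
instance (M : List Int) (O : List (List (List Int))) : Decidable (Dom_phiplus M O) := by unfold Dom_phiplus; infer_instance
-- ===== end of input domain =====

-- B replaces A's rescan of O for every i in M by one dictionary (value -> matching O-entries) built in a single pass over O, skipped when M is empty; an alternative one-pass-index algorithm.

-- ===== PORT A =====
-- j[0] is ported as j.headD []: exact on Pre_phiplus (there either M = [] and the loop body never runs, or every j in O is nonempty).
def phiplus (M : List Int) (O : List (List (List Int))) : List (List (List Int)) :=
  M.foldl (fun results i =>
    O.foldl (fun results j =>
      (j.headD []).foldl (fun results k =>
        if k == i then results ++ [j] else results) results) results) []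

-- ===== PORT B =====
-- index.setdefault(k, []).append(j)  ==  d.modify k [] (· ++ [j]); j[0] as j.headD [] (exact on Pre_phiplus)
def phiplusIndex (O : List (List (List Int))) : PySem.Dict Int (List (List (List Int))) :=
  O.foldl (fun d j =>
    (j.headD []).foldl (fun d k => d.modify k [] (· ++ [j])) d) PySem.Dict.empty

def phiplus_alt (M : List Int) (O : List (List (List Int))) : List (List (List Int)) :=
  if M = [] then []
  else M.foldl (fun results i => results ++ (phiplusIndex O).getD i []) []

-- ===== PRECONDITION & SPEC =====
-- Pre_ excludes exactly the inputs on which A raises: when M is nonempty A evaluates j[0] for every j in O, so an empty entry of O raises IndexError; when M = [] A never touches O and returns [].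
def Pre_phiplus (M : List Int) (O : List (List (List Int))) : Prop := M = [] ∨ ∀ j ∈ O, j ≠ []
instance (M : List Int) (O : List (List (List Int))) : Decidable (Pre_phiplus M O) := by unfold Pre_phiplus; infer_instance

def pvWitness_phiplus : List Int × List (List (List Int)) := ([1, 2], [[[1, 3], [5]], [[2, 1]]])

def Spec_phiplus (M : List Int) (O : List (List (List Int))) (out : List (List (List Int))) : Prop := out = phiplus_alt M O
instance (M : List Int) (O : List (List (List Int))) (out : List (List (List Int))) : Decidable (Spec_phiplus M O out) := by unfold Spec_phiplus; infer_instance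

-- ===== CLAIM (what is proved, stated in full; the proofs are below) =====
def Claim_equal_phiplus : Prop := ∀ (M : List Int) (O : List (List (List Int))), Dom_phiplus M O → Pre_phiplus M O → Spec_phiplus M O (phiplus M O)

-- ===== LEMMAS AND PROOFS =====

-- what both sides collect for one value i
def collectOne (i : Int) (O : List (List (List Int))) : List (List (List Int)) :=
  O.flatMap (fun j => ((j.headD []).filter (· == i)).map (fun _ => j))

-- A's inner two loops, for one fixed i, collect exactly collectOne i O
theorem phiplus_inner (i : Int) (O : List (List (List Int))) (acc : List (List (List Int))) :
    O.foldl (fun results j =>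
      (j.headD []).foldl (fun results k =>
        if k == i then results ++ [j] else results) results) acc
      = acc ++ collectOne i O := by
  rw [PySem.List.foldl_congr_mem O _
        (fun acc j => acc ++ ((j.headD []).filter (· == i)).map (fun _ => j)) acc
        (fun acc j _ => PySem.List.foldl_append_if (· == i) (fun _ => j) (j.headD []) acc),
      PySem.List.foldl_append_eq_flatMap]
  rfl

-- A's nested loops, flattened
theorem phiplus_eq_flatMap (M : List Int) (O : List (List (List Int))) :
    phiplus M O = M.flatMap (fun i => collectOne i O) := by
  unfold phiplus
  rw [PySem.List.foldl_congr_mem M _ (fun results i => results ++ collectOne i O) []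
        (fun acc i _ => phiplus_inner i O acc),
      PySem.List.foldl_append_eq_flatMap]
  rfl

-- the index at key i holds exactly collectOne i O
theorem phiplusIndex_getD (O : List (List (List Int)))
    (d : PySem.Dict Int (List (List (List Int)))) (i : Int) :
    ((O.foldl (fun d j =>
        (j.headD []).foldl (fun d k => d.modify k [] (· ++ [j])) d) d).getD i [])
      = d.getD i [] ++ collectOne i O := by
  induction O generalizing d with
  | nil => simp [collectOne]
  | cons j O ih =>
      rw [List.foldl_cons, ih]
      have h1 : ((j.headD []).foldl (fun d k => d.modify k [] (· ++ [j])) d)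
          = (((j.headD []).map (fun k => (k, j))).foldl
              (fun d p => d.modify p.1 [] (· ++ [p.2])) d) := by
        rw [List.foldl_map]
      rw [h1, PySem.Dict.getD_foldl_modify_append]
      simp [collectOne, List.filter_map, Function.comp_def]

theorem phiplus_alt_eq_flatMap (M : List Int) (O : List (List (List Int))) :
    phiplus_alt M O = M.flatMap (fun i => collectOne i O) := by
  unfold phiplus_alt
  rcases eq_or_ne M [] with h | h
  · simp [h]
  · rw [if_neg h,
        PySem.List.foldl_append_eq_flatMap (fun i => (phiplusIndex O).getD i []) M []]
    simp only [List.nil_append]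
    refine List.flatMap_congr (fun i _ => ?_)
    have h := phiplusIndex_getD O PySem.Dict.empty i
    simpa [phiplusIndex] using h

-- ===== VERDICT (by name: the statement is the Claim_ definition above) =====
theorem phiplus_spec : Claim_equal_phiplus := by
  intro M O _ _
  unfold Spec_phiplus
  rw [phiplus_eq_flatMap, phiplus_alt_eq_flatMap]
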